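-- pv_equiv track=rewrite | github.com/CoRAL-ASU/EviSearch | web/table_utils.py | _fix_row
-- ===== SOURCE A (Python) =====
-- from typing import List
--
-- def _is_single_label_row(cells: List[str]) -> bool:
--     non_empty = [c for c in cells if c and c.strip()]
--     return len(non_empty) == 1
--
-- def _is_header_like_row(cells: List[str], row_index: int) -> bool:
--     if row_index < 3:
--         return True
--     empty = sum(1 for c in cells if not c or not c.strip())
--     return empty >= len(cells) * 0.5
--
-- def _fix_row(row: List[str], row_index: int) -> List[str]:
--     if not row:
--         return row
--     if _is_single_label_row(row):
--         label = next(c for c in row if c and c.strip())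
--         return [label] * len(row)
--     if _is_header_like_row(row, row_index):
--         out = list(row)
--         last_non_empty = max(
--             (i for i, c in enumerate(out) if c and c.strip()),
--             default=-1,
--         )
--         prev = ""
--         for j in range(len(out)):
--             if out[j] and out[j].strip():
--                 prev = out[j]
--             elif prev and j <= last_non_empty:
--                 out[j] = prev
--         return out
--     return row
-- ===== SOURCE B (Python) =====
-- from typing import List
--
-- def _fix_row(row: List[str], row_index: int) -> List[str]:
--     if not row:
--         return row
--     # parse the row right-to-left into leading empties and runs of
--     # (non-empty value, its following empty cells)
--     lead, runs = [], []
--     for c in reversed(row):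
--         if c.strip():
--             lead.reverse()
--             runs.append((c, lead))
--             lead = []
--         else:
--             lead.append(c)
--     lead.reverse()
--     runs.reverse()
--     if len(runs) == 1:
--         return [runs[0][0]] * len(row)
--     if runs and (row_index < 3 or 2 * len(runs) <= len(row)):
--         out = lead
--         for v, es in runs[:-1]:
--             out.extend([v] * (1 + len(es)))
--         out.append(runs[-1][0])
--         out.extend(runs[-1][1])
--         return out
--     return row
-- ===== Notes on version B (the rewrite author's own statement) =====
-- stated objective: alternative
-- what changed: A forward-fills the row in place (running max over enumerate to find the last non-empty index, then one index loop carrying prev with a 'j <= last' guard); B instead parses the row right-to-left into leading empties plus runs of (non-empty value, its following empty cells) and re-emits each non-last run as its value replicated over itself and its gap, keeping the last run and the leading empties as is; the single-label and header-like tests are read off the run structure (number of runs) instead of separate filter passes.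
import Mathlib
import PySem

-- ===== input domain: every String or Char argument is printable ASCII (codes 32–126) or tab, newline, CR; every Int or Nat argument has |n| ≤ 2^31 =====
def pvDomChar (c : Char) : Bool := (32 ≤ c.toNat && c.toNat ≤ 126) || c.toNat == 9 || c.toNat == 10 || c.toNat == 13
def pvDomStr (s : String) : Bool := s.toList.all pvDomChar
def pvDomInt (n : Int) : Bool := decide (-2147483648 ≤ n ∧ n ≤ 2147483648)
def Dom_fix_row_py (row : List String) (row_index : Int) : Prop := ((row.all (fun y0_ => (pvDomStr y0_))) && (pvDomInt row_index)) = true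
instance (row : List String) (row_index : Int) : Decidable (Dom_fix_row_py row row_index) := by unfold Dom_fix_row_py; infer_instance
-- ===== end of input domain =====

-- B replaces A's in-place forward fill (running max over enumerate, then a guarded index
-- loop) by a run-length parse/emit: parse the row right-to-left into leading empties and
-- runs of (non-empty value, following empties), then re-emit each non-last run as its
-- value replicated over itself and its gap (objective: alternative algorithm).

-- ===== PORT A =====
-- _is_single_label_row
def is_single_label_row_py (cells : List String) : Bool :=
  let non_empty := cells.filter (fun c => c != "" && PySem.Str.strip c != "")
  non_empty.length == 1

-- _is_header_like_row. 'empty >= len(cells) * 0.5' is ported as '2*empty >= len': exact,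
-- since len*0.5 is exactly representable in binary floating point for any list length.
def is_header_like_row_py (cells : List String) (row_index : Int) : Bool :=
  if row_index < 3 then true
  else
    let empty : Int := cells.foldl (fun acc c => if c = "" ∨ PySem.Str.strip c = "" then acc + 1 else acc) 0
    decide (2 * empty ≥ (cells.length : Int))

-- the 'for j in range(len(out))' loop of _fix_row, with state (out, prev)
def fixLoopA (out : List String) (prev : String) (j : Nat) (last : Int) : List String :=
  if h : j < out.length then
    let c := out[j]
    if c != "" && PySem.Str.strip c != "" then fixLoopA out c (j + 1) last
    else if prev != "" && decide ((j : Int) ≤ last) then fixLoopA (out.set j prev) prev (j + 1) last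
    else fixLoopA out prev (j + 1) last
  else out
termination_by out.length - j
decreasing_by all_goals simp_all; omega

def fix_row_py (row : List String) (row_index : Int) : List String :=
  if row = [] then row
  else if is_single_label_row_py row then
    -- next(c for c in row if c and c.strip()): a match exists in this branch
    let label := (row.find? (fun c => c != "" && PySem.Str.strip c != "")).getD ""
    List.replicate row.length label
  else if is_header_like_row_py row row_index then
    let out := row
    -- max((i for i, c in enumerate(out) if c and c.strip()), default=-1) as a running max
    let last_non_empty : Int :=
      ((PySem.List.enumerate out).filter (fun p => p.2 != "" && PySem.Str.strip p.2 != "")).foldl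
        (fun m p => max m p.1) (-1)
    fixLoopA out "" 0 last_non_empty
  else row

-- ===== PORT B =====
-- the 'for c in reversed(row)' parsing loop of B, with state (lead, runs);
-- lead/runs are built by 'append' and reversed where Source B calls .reverse()
def parseLoop (row : List String) : List String × List (String × List String) :=
  let st := row.reverse.foldl
    (fun (st : List String × List (String × List String)) c =>
      if PySem.Str.strip c != "" then ([], st.2 ++ [(c, st.1.reverse)]) else (st.1 ++ [c], st.2))
    ([], [])
  (st.1.reverse, st.2.reverse)

def fix_row_py_alt (row : List String) (row_index : Int) : List String :=
  if row = [] then row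
  else
    let st := parseLoop row
    let lead := st.1
    let runs := st.2
    if runs.length == 1 then
      List.replicate row.length ((runs.headD ("", [])).1)   -- runs[0][0]: in range here
    else if !runs.isEmpty &&
        (decide (row_index < 3) || decide (2 * (runs.length : Int) ≤ (row.length : Int))) then
      -- 'for v, es in runs[:-1]: out = out + [v] * (1 + len(es))', then last run kept as is
      (runs.dropLast.foldl (fun out p => out ++ List.replicate (1 + p.2.length) p.1) lead)
        ++ [(runs.getLast?.getD ("", [])).1] ++ (runs.getLast?.getD ("", [])).2
    else row

-- ===== PRECONDITION & SPEC =====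
def Spec_fix_row_py (row : List String) (row_index : Int) (out : List String) : Prop := out = fix_row_py_alt row row_index
instance (row : List String) (row_index : Int) (out : List String) : Decidable (Spec_fix_row_py row row_index out) := by unfold Spec_fix_row_py; infer_instance

-- ===== CLAIM (what is proved, stated in full; the proofs are below) =====
def Claim_equal_fix_row_py : Prop := ∀ (row : List String) (row_index : Int), Dom_fix_row_py row row_index → Spec_fix_row_py row row_index (fix_row_py row row_index)

-- ===== LEMMAS AND PROOFS =====

-- A's cell test 'c and c.strip()' coincides with B's 'c.strip()' (strip "" = "")
theorem pred_nonempty_eq (c : String) :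
    (c != "" && PySem.Str.strip c != "") = (PySem.Str.strip c != "") := by
  by_cases hc : c = ""
  · subst hc; decide
  · simp [hc]

theorem pred_empty_eq (c : String) :
    (decide (c = "" ∨ PySem.Str.strip c = "")) = (PySem.Str.strip c == "") := by
  by_cases hc : c = ""
  · subst hc; decide
  · by_cases hs : PySem.Str.strip c = "" <;> simp [hc, hs]

theorem strip_ne_imp_ne (c : String) (h : PySem.Str.strip c ≠ "") : c ≠ "" := by
  intro hc; subst hc; exact h (by decide)

-- structural form of A's fill loop
def gSpec : List String → String → Int → Int → List String
  | [], _, _, _ => []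
  | c :: t, prev, j, last =>
    if c != "" && PySem.Str.strip c != "" then c :: gSpec t c (j + 1) last
    else if prev != "" && decide (j ≤ last) then prev :: gSpec t prev (j + 1) last
    else c :: gSpec t prev (j + 1) last

theorem fixLoopA_eq_gSpec (out : List String) (prev : String) (j : Nat) (last : Int) :
    fixLoopA out prev j last = out.take j ++ gSpec (out.drop j) prev (j : Int) last := by
  fun_induction fixLoopA out prev j last with
  | case1 out prev j h c hcond ih =>
    have hc : c = out[j] := rfl
    rw [hc] at hcond ih ⊢
    rw [ih, List.drop_eq_getElem_cons h, List.take_add_one, List.getElem?_eq_getElem h,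
      Option.toList_some]
    simp only [gSpec]
    rw [if_pos hcond]
    push_cast
    rw [List.append_assoc, List.singleton_append]
  | case2 out prev j h c hc1 hc2 ih =>
    have hc : c = out[j] := rfl
    rw [hc] at hc1
    rw [ih]
    have hset : (out.set j prev).take (j + 1) = out.take j ++ [prev] := by
      rw [List.take_add_one, List.take_set_of_le (Nat.le_refl j), List.getElem?_set_self h]
      rfl
    have hdrop : (out.set j prev).drop (j + 1) = out.drop (j + 1) :=
      List.drop_set_of_lt (by omega)
    rw [hset, hdrop, List.drop_eq_getElem_cons h]
    simp only [gSpec]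
    rw [if_neg hc1, if_pos hc2]
    push_cast
    simp
  | case3 out prev j h c hc1 hc2 ih =>
    have hc : c = out[j] := rfl
    rw [hc] at hc1
    rw [ih, List.drop_eq_getElem_cons h, List.take_add_one, List.getElem?_eq_getElem h,
      Option.toList_some]
    simp only [gSpec]
    rw [if_neg hc1, if_neg hc2]
    push_cast
    rw [List.append_assoc, List.singleton_append]
  | case4 out prev j h =>
    rw [List.drop_eq_nil_of_le (by omega), List.take_of_length_le (by omega)]
    simp [gSpec]

theorem gSpec_tail (zs : List String) (prev : String) (j last : Int)
    (hz : ∀ c ∈ zs, PySem.Str.strip c = "") (hlt : last < j) : gSpec zs prev j last = zs := by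
  induction zs generalizing prev j with
  | nil => rfl
  | cons c t ih =>
    have hc := hz c (by simp)
    simp only [gSpec]
    rw [if_neg (by simp [hc]),
      if_neg (by simp only [Bool.and_eq_true, decide_eq_true_eq, not_and]; intro _; omega)]
    rw [ih prev (j + 1) (fun x hx => hz x (List.mem_cons_of_mem _ hx)) (by omega)]

-- over leading empties with prev = "" the loop keeps the cells and prev stays ""
theorem gSpec_lead (lead rest : List String) (j last : Int)
    (h : ∀ c ∈ lead, PySem.Str.strip c = "") :
    gSpec (lead ++ rest) "" j last = lead ++ gSpec rest "" (j + lead.length) last := by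
  induction lead generalizing j with
  | nil => simp
  | cons c t ih =>
    have hc := h c (by simp)
    simp only [List.cons_append, gSpec]
    rw [if_neg (by simp [hc]), if_neg (by simp)]
    rw [ih (j + 1) (fun x hx => h x (List.mem_cons_of_mem _ hx))]
    have harith : j + 1 + (t.length : Int) = j + ((t.length : Int) + 1) := by ring
    simp only [List.length_cons, List.cons_append]
    push_cast
    rw [harith]

-- over empties with a non-empty prev and indices within last the loop writes prev
theorem gSpec_fill (es rest : List String) (prev : String) (j last : Int)
    (hp : prev ≠ "") (he : ∀ c ∈ es, PySem.Str.strip c = "")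
    (hle : j + es.length ≤ last + 1) :
    gSpec (es ++ rest) prev j last =
      List.replicate es.length prev ++ gSpec rest prev (j + es.length) last := by
  induction es generalizing j with
  | nil => simp
  | cons c t ih =>
    have hc := he c (by simp)
    simp only [List.cons_append, gSpec, List.length_cons]
    rw [if_neg (by simp [hc]),
      if_pos (by simp only [Bool.and_eq_true, bne_iff_ne, ne_eq, decide_eq_true_eq]
                 refine ⟨hp, ?_⟩; simp at hle; omega)]
    rw [ih (j + 1) (fun x hx => he x (List.mem_cons_of_mem _ hx)) (by simp at hle ⊢; omega)]
    rw [List.replicate_succ]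
    have harith : j + 1 + (t.length : Int) = j + ((t.length : Int) + 1) := by ring
    simp only [List.cons_append]
    push_cast
    rw [harith]

-- the flattening of the run structure
def flatRuns (runs : List (String × List String)) : List String :=
  runs.flatMap (fun p => p.1 :: p.2)

theorem flat_len_ge (runs : List (String × List String)) (h : runs ≠ []) :
    (runs.getLast?.getD ("", [])).2.length + 1 ≤ (flatRuns runs).length := by
  induction runs with
  | nil => exact absurd rfl h
  | cons p rs ih =>
    cases rs with
    | nil => simp [flatRuns]
    | cons q rs' =>
      rw [List.getLast?_cons_cons]
      have := ih (by simp)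
      simp only [flatRuns, List.flatMap_cons, List.length_append, List.length_cons] at this ⊢
      omega

-- the loop writes each non-last run as its value replicated over itself and its gap
theorem gSpec_runs (runs : List (String × List String)) (h : runs ≠ [])
    (hv : ∀ p ∈ runs, PySem.Str.strip p.1 ≠ "" ∧ ∀ c ∈ p.2, PySem.Str.strip c = "")
    (prev : String) (j last : Int)
    (hlast : last = j + (flatRuns runs).length - (runs.getLast?.getD ("", [])).2.length - 1) :
    gSpec (flatRuns runs) prev j last =
      runs.dropLast.flatMap (fun p => List.replicate (1 + p.2.length) p.1)
        ++ [(runs.getLast?.getD ("", [])).1] ++ (runs.getLast?.getD ("", [])).2 := by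
  induction runs generalizing prev j with
  | nil => exact absurd rfl h
  | cons p rs ih =>
    have hp := hv p (by simp)
    have hpe : p.1 ≠ "" := strip_ne_imp_ne p.1 hp.1
    cases rs with
    | nil =>
      simp only [flatRuns, List.flatMap_cons, List.flatMap_nil, List.append_nil,
        List.getLast?_singleton, Option.getD_some, List.length_cons] at hlast ⊢
      have hj : last = j := by omega
      simp only [gSpec]
      rw [if_pos (by simp [hpe, hp.1])]
      rw [gSpec_tail p.2 p.1 (j + 1) last hp.2 (by omega)]
      simp
    | cons q rs' =>
      have hlge := flat_len_ge (q :: rs') (by simp)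
      rw [List.getLast?_cons_cons] at hlast ⊢
      simp only [flatRuns, List.flatMap_cons, List.length_append, List.length_cons] at hlast hlge ⊢
      simp only [List.cons_append, gSpec]
      rw [if_pos (by simp [hpe, hp.1])]
      rw [gSpec_fill p.2 _ p.1 (j + 1) last hpe hp.2 (by push_cast; omega)]
      have ih' := ih (by simp) (fun x hx => hv x (List.mem_cons_of_mem _ hx)) p.1
        (j + 1 + (p.2.length : Int))
        (by simp only [flatRuns, List.flatMap_cons, List.length_append, List.length_cons]
            push_cast at hlast ⊢; omega)
      simp only [flatRuns, List.flatMap_cons, List.cons_append] at ih'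
      rw [ih']
      rw [List.dropLast_cons₂, List.flatMap_cons]
      rw [Nat.add_comm 1 p.2.length, List.replicate_succ]
      simp [List.append_assoc]

-- structural form of B's parsing loop
def parseRow : List String → List String × List (String × List String)
  | [] => ([], [])
  | c :: t =>
    if PySem.Str.strip c != "" then ([], (c, (parseRow t).1) :: (parseRow t).2)
    else (c :: (parseRow t).1, (parseRow t).2)

theorem parseLoop_eq (row : List String) : parseLoop row = parseRow row := by
  have key : row.reverse.foldl
      (fun (st : List String × List (String × List String)) c =>
        if PySem.Str.strip c != "" then ([], st.2 ++ [(c, st.1.reverse)]) else (st.1 ++ [c], st.2))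
      ([], []) = ((parseRow row).1.reverse, (parseRow row).2.reverse) := by
    rw [List.foldl_reverse]
    induction row with
    | nil => rfl
    | cons c t ih =>
      rw [List.foldr_cons, ih]
      by_cases hc : PySem.Str.strip c = "" <;>
        simp [parseRow, hc, List.reverse_cons]
  unfold parseLoop
  rw [key]
  simp

theorem parse_decomp (row : List String) :
    row = (parseRow row).1 ++ flatRuns (parseRow row).2 := by
  induction row with
  | nil => rfl
  | cons c t ih =>
    by_cases hc : PySem.Str.strip c = "" <;>
      simp only [parseRow, hc, bne_self_eq_false, if_neg, if_pos, flatRuns,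
        List.flatMap_cons, List.cons_append, List.nil_append, bne_iff_ne, ne_eq,
        not_true_eq_false, not_false_eq_true, ite_true, ite_false] <;>
      simp [hc, flatRuns] at ih ⊢ <;> exact ih

theorem parse_lead (row : List String) :
    ∀ c ∈ (parseRow row).1, PySem.Str.strip c = "" := by
  induction row with
  | nil => simp [parseRow]
  | cons c t ih =>
    by_cases hc : PySem.Str.strip c = "" <;> simp only [parseRow, hc] <;> simp [hc, ih]
    intro x hx
    exact ih x hx

theorem parse_runs (row : List String) :
    ∀ p ∈ (parseRow row).2, PySem.Str.strip p.1 ≠ "" ∧ ∀ c ∈ p.2, PySem.Str.strip c = "" := by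
  induction row with
  | nil => simp [parseRow]
  | cons c t ih =>
    by_cases hc : PySem.Str.strip c = ""
    · have hb : (PySem.Str.strip c != "") = false := by simp [hc]
      rw [show parseRow (c :: t) = (c :: (parseRow t).1, (parseRow t).2) by
        simp [parseRow, hb]]
      exact ih
    · have hb : (PySem.Str.strip c != "") = true := by simp [hc]
      rw [show parseRow (c :: t) = ([], (c, (parseRow t).1) :: (parseRow t).2) by
        simp [parseRow, hb]]
      intro p hp
      rcases List.mem_cons.1 hp with h | h
      · subst h; exact ⟨hc, parse_lead t⟩
      · exact ih p h

theorem parse_filter (row : List String) :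
    row.filter (fun c => PySem.Str.strip c != "") = (parseRow row).2.map Prod.fst := by
  induction row with
  | nil => rfl
  | cons c t ih =>
    by_cases hc : PySem.Str.strip c = "" <;>
      simp only [parseRow, hc, List.filter_cons] <;> simp [hc, ih]

-- takeWhile over an all-true prefix followed by a failing element
theorem takeWhile_all_append {α : Type} (p : α → Bool) (l1 l2 : List α) (b : α)
    (h1 : ∀ a ∈ l1, p a = true) (hb : p b = false) :
    (l1 ++ b :: l2).takeWhile p = l1 := by
  induction l1 with
  | nil => simp [List.takeWhile_cons, hb]
  | cons a t ih =>
    have ha := h1 a (by simp)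
    simp [ha, ih (fun x hx => h1 x (List.mem_cons_of_mem _ hx))]

-- the trailing empty run of the row is the last parsed run's empties
theorem tail_of_flat (pre : List String) (runs : List (String × List String)) (h : runs ≠ [])
    (hv : ∀ p ∈ runs, PySem.Str.strip p.1 ≠ "" ∧ ∀ c ∈ p.2, PySem.Str.strip c = "") :
    ((pre ++ flatRuns runs).reverse.takeWhile (fun c => PySem.Str.strip c == "")).length
      = (runs.getLast?.getD ("", [])).2.length := by
  induction runs generalizing pre with
  | nil => exact absurd rfl h
  | cons p rs ih =>
    have hp := hv p (by simp)
    cases rs with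
    | nil =>
      simp only [flatRuns, List.flatMap_cons, List.flatMap_nil, List.append_nil,
        List.getLast?_singleton, Option.getD_some]
      rw [show pre ++ (p.1 :: p.2) = pre ++ [p.1] ++ p.2 by simp, List.reverse_append]
      rw [List.reverse_append]
      simp only [List.reverse_cons, List.reverse_nil, List.nil_append, List.singleton_append]
      rw [takeWhile_all_append _ p.2.reverse _ p.1
        (fun a ha => by simp [hp.2 a (List.mem_reverse.1 ha)]) (by simp [hp.1])]
      simp
    | cons q rs' =>
      rw [List.getLast?_cons_cons]
      have : pre ++ flatRuns (p :: q :: rs') = (pre ++ (p.1 :: p.2)) ++ flatRuns (q :: rs') := by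
        simp [flatRuns]
      rw [this, ih (pre ++ (p.1 :: p.2)) (by simp) (fun x hx => hv x (List.mem_cons_of_mem _ hx))]

def lastIdx (xs : List String) : Int :=
  ((PySem.List.enumerate xs).filter (fun p => p.2 != "" && PySem.Str.strip p.2 != "")).foldl
    (fun m p => max m p.1) (-1)

-- upper bound for the running-max fold
theorem foldl_max_le (l : List (Int × String)) (m b : Int) (hm : m ≤ b)
    (hb : ∀ p ∈ l, p.1 ≤ b) : l.foldl (fun m p => max m p.1) m ≤ b := by
  induction l generalizing m with
  | nil => exact hm
  | cons p t ih =>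
    exact ih (max m p.1) (by simp [hm, hb p (by simp)]) (fun q hq => hb q (by simp [hq]))

theorem lastIdx_le (xs : List String) : lastIdx xs ≤ (xs.length : Int) - 1 := by
  apply foldl_max_le
  · omega
  · intro p hp
    rcases (PySem.List.mem_enumerate_iff _ _ _).1 (List.mem_of_mem_filter hp) with ⟨k, hk, hpk⟩
    subst hpk; simp; omega

-- A's last_non_empty in terms of the trailing empty run
theorem lastIdx_eq (xs : List String) :
    lastIdx xs = (xs.length : Int)
      - ((xs.reverse.takeWhile (fun c => PySem.Str.strip c == "")).length : Int) - 1 := by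
  induction xs using List.reverseRecOn with
  | nil => simp [lastIdx, PySem.List.enumerate_nil]
  | append_singleton xs c ih =>
    have htle : (xs.reverse.takeWhile fun c => PySem.Str.strip c == "").length ≤ xs.length := by
      have := (List.takeWhile_prefix (l := xs.reverse) (fun c => PySem.Str.strip c == "")).length_le
      simpa using this
    by_cases hc : PySem.Str.strip c = ""
    · have hrev : (xs ++ [c]).reverse.takeWhile (fun c => PySem.Str.strip c == "") =
          c :: xs.reverse.takeWhile (fun c => PySem.Str.strip c == "") := by
        simp [hc]
      have h1 : lastIdx (xs ++ [c]) = lastIdx xs := by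
        unfold lastIdx
        rw [PySem.List.enumerate_append, List.filter_append]
        simp [PySem.List.enumerate_cons, PySem.List.enumerate_nil, hc]
      rw [h1, ih, hrev]
      simp only [List.length_append, List.length_cons, List.length_nil]
      push_cast
      omega
    · have hc' : c ≠ "" := by intro h; subst h; exact hc (by decide)
      have hrev : (xs ++ [c]).reverse.takeWhile (fun c => PySem.Str.strip c == "") = [] := by
        simp [hc]
      have h1 : lastIdx (xs ++ [c]) = max (lastIdx xs) (xs.length : Int) := by
        unfold lastIdx
        rw [PySem.List.enumerate_append, List.filter_append]
        have hsing : (PySem.List.enumerate [c] (0 + (xs.length : Int))).filter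
            (fun p => p.2 != "" && PySem.Str.strip p.2 != "")
            = [((xs.length : Int), c)] := by
          simp [PySem.List.enumerate_cons, PySem.List.enumerate_nil, hc, hc']
        rw [hsing, List.foldl_append]
        simp
      rw [h1, max_eq_right (le_trans (lastIdx_le xs) (by omega)), hrev]
      simp only [List.length_append, List.length_cons, List.length_nil]
      push_cast
      omega

theorem lastIdx_neg (xs : List String) (h : ∀ c ∈ xs, PySem.Str.strip c = "") :
    lastIdx xs = -1 := by
  unfold lastIdx
  have hf : ((PySem.List.enumerate xs 0).filter (fun p => p.2 != "" && PySem.Str.strip p.2 != "")) = [] := by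
    rw [List.filter_eq_nil_iff]
    intro p hp
    rcases (PySem.List.mem_enumerate_iff _ _ _).1 hp with ⟨k, hk, hpk⟩
    subst hpk
    simp [h _ (List.getElem_mem hk)]
  rw [hf]
  rfl

-- find? with A's test = head of B's filtered list
theorem find?_eq_head_filter (l : List String) :
    l.find? (fun c => PySem.Str.strip c != "") = (l.filter (fun c => PySem.Str.strip c != "")).head? := by
  induction l with
  | nil => rfl
  | cons c t ih =>
    by_cases hc : PySem.Str.strip c = ""
    · simp only [List.find?_cons, List.filter_cons, hc]
      exact ih
    · have hb : (PySem.Str.strip c != "") = true := by simp [hc]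
      simp [hb]

-- A's empty-count fold = length of the empty filter
theorem empty_count_eq (l : List String) :
    l.foldl (fun acc c => if c = "" ∨ PySem.Str.strip c = "" then acc + 1 else acc) (0 : Int)
      = ((l.filter (fun c => PySem.Str.strip c == "")).length : Int) := by
  rw [PySem.List.foldl_ite_add_one, List.countP_eq_length_filter]
  simp only [zero_add, Int.natCast_inj]
  congr 1
  apply List.filter_congr
  intro c _
  exact pred_empty_eq c

theorem length_filter_compl (l : List String) :
    (l.filter (fun c => PySem.Str.strip c == "")).length
      + (l.filter (fun c => PySem.Str.strip c != "")).length = l.length := by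
  induction l with
  | nil => rfl
  | cons c t ih =>
    by_cases hc : PySem.Str.strip c = "" <;> simp [hc] <;> omega

-- ===== VERDICT (by name: the statement is the Claim_ definition above) =====
theorem fix_row_py_spec : Claim_equal_fix_row_py := by
  intro row row_index _
  unfold Spec_fix_row_py fix_row_py fix_row_py_alt
  by_cases hrow : row = []
  · simp [hrow]
  rw [if_neg hrow, if_neg hrow]
  simp only [parseLoop_eq]
  set lead := (parseRow row).1 with hlead
  set runs := (parseRow row).2 with hruns
  have hdec : row = lead ++ flatRuns runs := parse_decomp row
  have hfil : row.filter (fun c => PySem.Str.strip c != "") = runs.map Prod.fst :=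
    parse_filter row
  have hfilter : row.filter (fun c => c != "" && PySem.Str.strip c != "")
      = row.filter (fun c => PySem.Str.strip c != "") := by
    apply List.filter_congr; intro c _; exact pred_nonempty_eq c
  have hsl_iff : is_single_label_row_py row = (runs.length == 1) := by
    simp only [is_single_label_row_py]
    rw [hfilter, hfil, List.length_map]
  by_cases hsl : runs.length = 1
  · rw [hsl_iff, if_pos (show (runs.length == 1) = true by simp [hsl]),
      if_pos (show (runs.length == 1) = true by simp [hsl])]
    rcases List.length_eq_one_iff.1 hsl with ⟨p, hp⟩
    congr 1
    rw [show (fun c => c != "" && PySem.Str.strip c != "") = (fun c => PySem.Str.strip c != "")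
          from funext pred_nonempty_eq]
    rw [find?_eq_head_filter, hfil, hp]
    rfl
  · rw [hsl_iff, if_neg (show ¬((runs.length == 1) = true) by simp [hsl]),
      if_neg (show ¬((runs.length == 1) = true) by simp [hsl])]
    have hcompl := length_filter_compl row
    have hhead : is_header_like_row_py row row_index =
        (decide (row_index < 3) || decide (2 * (runs.length : Int) ≤ (row.length : Int))) := by
      unfold is_header_like_row_py
      rw [empty_count_eq]
      have h2 : (decide (2 * ((row.filter (fun c => PySem.Str.strip c == "")).length : Int)
          ≥ (row.length : Int))) = (decide (2 * (runs.length : Int) ≤ (row.length : Int))) := by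
        have hlen : (row.filter (fun c => PySem.Str.strip c != "")).length = runs.length := by
          rw [hfil, List.length_map]
        rw [← hlen]
        by_cases hq : 2 * ((row.filter (fun c => PySem.Str.strip c == "")).length : Int)
            ≥ (row.length : Int)
        · rw [decide_eq_true hq, eq_comm, decide_eq_true_eq]; omega
        · rw [decide_eq_false hq, eq_comm, decide_eq_false_iff_not]; omega
      by_cases h3 : row_index < 3 <;> simp [h3, h2]
    by_cases hre : runs = []
    · -- all cells empty: A's fill pass leaves the row unchanged, B returns row
      have hempty : ∀ c ∈ row, PySem.Str.strip c = "" := by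
        intro c hc
        rw [hdec, hre] at hc
        simp [flatRuns] at hc
        exact parse_lead row c hc
      have hh : is_header_like_row_py row row_index = true := by
        rw [hhead, hre]
        simp only [List.length_nil, Nat.cast_zero, mul_zero, Bool.or_eq_true, decide_eq_true_eq]
        right; positivity
      rw [if_pos hh,
        if_neg (show ¬((!runs.isEmpty && (decide (row_index < 3)
          || decide (2 * (runs.length : Int) ≤ (row.length : Int)))) = true) by simp [hre])]
      show fixLoopA row "" 0 (lastIdx row) = row
      rw [fixLoopA_eq_gSpec]
      simp only [List.take_zero, List.drop_zero, List.nil_append, Nat.cast_zero]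
      rw [gSpec_tail row "" 0 (lastIdx row) hempty (by rw [lastIdx_neg row hempty]; omega)]
    · have hv := parse_runs row
      by_cases hh : row_index < 3 ∨ 2 * (runs.length : Int) ≤ (row.length : Int)
      · have hhA : is_header_like_row_py row row_index = true := by
          rw [hhead]; rcases hh with h | h <;> simp [h]
        rw [if_pos hhA,
          if_pos (show (!runs.isEmpty && (decide (row_index < 3)
            || decide (2 * (runs.length : Int) ≤ (row.length : Int)))) = true by
              rcases hh with h | h <;> simp [hre, h])]
        -- both sides compute the filled row
        have htail : ((row.reverse.takeWhile (fun c => PySem.Str.strip c == "")).length)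
            = (runs.getLast?.getD ("", [])).2.length := by
          conv_lhs => rw [hdec]
          exact tail_of_flat lead runs hre hv
        have hL : lastIdx row = (row.length : Int)
            - ((runs.getLast?.getD ("", [])).2.length : Int) - 1 := by
          rw [lastIdx_eq, htail]
        show fixLoopA row "" 0 (lastIdx row) = _
        rw [fixLoopA_eq_gSpec]
        simp only [List.take_zero, List.drop_zero, List.nil_append, Nat.cast_zero]
        rw [PySem.List.foldl_append_eq_flatMap]
        rw [hL]
        conv_lhs => rw [hdec]
        rw [gSpec_lead lead (flatRuns runs) 0 _ (parse_lead row)]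
        rw [gSpec_runs runs hre hv "" (0 + lead.length) _
          (by simp only [List.length_append]
              push_cast
              omega)]
        simp [List.append_assoc]
      · rw [if_neg (show ¬(is_header_like_row_py row row_index = true) by
            rw [hhead]; simpa using hh),
          if_neg (show ¬((!runs.isEmpty && (decide (row_index < 3)
            || decide (2 * (runs.length : Int) ≤ (row.length : Int)))) = true) by
              simp only [Bool.and_eq_true, Bool.or_eq_true, decide_eq_true_eq]
              rintro ⟨-, h | h⟩
              · exact hh (Or.inl h)
              · exact hh (Or.inr h))]
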